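-- pv_equiv track=rewrite | github.com/PurpleKaz81/cgpt | cgpt.py | _extract_deliverables
-- ===== SOURCE A (Python) =====
-- from typing import Any, Dict, List, Optional, Set, Tuple
--
-- def _extract_deliverables(text: str, patterns: Optional[List[str]] = None) -> str:
--     """Extract deliverables only (headings, constraints, drafts).
--
--     If patterns provided, match against section headers.
--     Default patterns: "##", "Constraint", "Draft", "Decision", "Output", "Result"
--     """
--     if patterns is None:
--         patterns = [
--             "##",
--             "constraint",
--             "draft",
--             "decision",
--             "output",
--             "result",
--             "deliverable",
--         ]
--
--     lines = text.split("\n")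
--     deliverables = []
--     in_section = False
--     current_section = []
--
--     for line in lines:
--         line_lower = line.lower()
--
--         # Check if line matches any pattern (start of a deliverable)
--         matches_pattern = any(p.lower() in line_lower for p in patterns)
--
--         if matches_pattern:
--             # Save previous section if any
--             if current_section:
--                 deliverables.extend(current_section)
--             # Start new section
--             in_section = True
--             current_section = [line]
--         elif in_section:
--             # Continue collecting section content
--             if line.strip():  # Include non-empty lines
--                 current_section.append(line)
--             elif current_section and len(current_section) > 1:
--                 # Stop section on blank line (after content)
--                 deliverables.extend(current_section)
--                 current_section = []
--                 in_section = False
--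
--     # Include final section
--     if current_section:
--         deliverables.extend(current_section)
--
--     return "\n".join(deliverables)
-- ===== SOURCE B (Python) =====
-- from typing import List, Optional
--
-- def _extract_deliverables(text: str, patterns: Optional[List[str]] = None) -> str:
--     """Segment walk: emit each header line eagerly, then its content lines,
--     skipping leading blanks and cutting the section at the first blank after content."""
--     if patterns is None:
--         patterns = [
--             "##",
--             "constraint",
--             "draft",
--             "decision",
--             "output",
--             "result",
--             "deliverable",
--         ]
--     pats = [p.lower() for p in patterns]
--
--     def is_header(line):
--         ll = line.lower()
--         return any(p in ll for p in pats)
--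
--     lines = text.split("\n")
--     out = []
--     i = 0
--     n = len(lines)
--     while i < n:
--         line = lines[i]
--         i += 1
--         if not is_header(line):
--             continue  # seeking: drop lines until the next header
--         out.append(line)
--         content = False
--         while i < n and not is_header(lines[i]):
--             ln = lines[i]
--             i += 1
--             if ln.strip():
--                 out.append(ln)
--                 content = True
--             elif content:
--                 break  # blank after content ends the section; outer loop seeks on
--     return "\n".join(out)
-- ===== Notes on version B (the rewrite author's own statement) =====
-- stated objective: alternative
-- what changed: Replaced A's buffered state machine (current_section list + in_section flag, flushed on headers/blanks/end) by an eager nested-loop segment walk that emits each kept line immediately: an outer loop seeks the next header, an inner loop emits its non-blank body lines and breaks at the first blank after content.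
import Mathlib
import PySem

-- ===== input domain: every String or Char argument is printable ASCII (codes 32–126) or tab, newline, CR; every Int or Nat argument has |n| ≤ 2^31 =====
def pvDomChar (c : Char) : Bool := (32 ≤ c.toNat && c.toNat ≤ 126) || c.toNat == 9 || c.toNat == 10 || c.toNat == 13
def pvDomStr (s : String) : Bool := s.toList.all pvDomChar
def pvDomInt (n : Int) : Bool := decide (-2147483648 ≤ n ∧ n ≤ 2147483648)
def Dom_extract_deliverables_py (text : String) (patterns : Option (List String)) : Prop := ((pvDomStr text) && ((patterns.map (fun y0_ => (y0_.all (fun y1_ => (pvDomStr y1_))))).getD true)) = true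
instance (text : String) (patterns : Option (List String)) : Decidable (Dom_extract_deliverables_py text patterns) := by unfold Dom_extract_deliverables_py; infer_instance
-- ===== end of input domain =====

-- B replaces A's buffered state machine (pending current_section + in_section flag, flushed on
-- headers/blanks/end) by an eager segment walk: nested loops that emit each kept line at once
-- (objective: simpler/alternative decomposition, same O(n·p) cost).

-- ===== PORT A =====
def pvDefaultPatterns : List String :=
  ["##", "constraint", "draft", "decision", "output", "result", "deliverable"]

-- one iteration of A's `for line in lines` loop; state = (deliverables, in_section, current_section)
def pvAStep (patterns : List String) (st : List String × Bool × List String) (line : String) :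
    List String × Bool × List String :=
  let line_lower := PySem.Str.lower line
  let matches_pattern := patterns.any (fun p => PySem.Str.isIn (PySem.Str.lower p) line_lower)
  if matches_pattern then
    (st.1 ++ st.2.2, true, [line])
  else if st.2.1 then
    if PySem.Str.strip line ≠ "" then (st.1, st.2.1, st.2.2 ++ [line])
    else if st.2.2 ≠ [] ∧ st.2.2.length > 1 then (st.1 ++ st.2.2, false, [])
    else st
  else st

def extract_deliverables_py (text : String) (patterns : Option (List String)) : String :=
  let patterns := match patterns with
    | none => pvDefaultPatterns
    | some ps => ps
  let lines := (PySem.Str.split? text "\n").getD []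
  let st := lines.foldl (pvAStep patterns) ([], false, [])
  let deliverables := if st.2.2 ≠ [] then st.1 ++ st.2.2 else st.1
  PySem.Str.join "\n" deliverables

-- ===== PORT B =====
def pvIsHeader (pats : List String) (line : String) : Bool :=
  pats.any (fun p => PySem.Str.isIn p (PySem.Str.lower line))

mutual
-- outer loop while not at a header: drop lines, emit the header and enter its body
def pvSeek (pats : List String) : List String → List String
  | [] => []
  | l :: ls => if pvIsHeader pats l then l :: pvBody pats false ls else pvSeek pats ls
-- inner loop over a section body: emit non-blank lines; a blank after content cuts the section
def pvBody (pats : List String) (content : Bool) : List String → List String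
  | [] => []
  | l :: ls =>
    if pvIsHeader pats l then l :: pvBody pats false ls
    else if PySem.Str.strip l ≠ "" then l :: pvBody pats true ls
    else if content then pvSeek pats ls
    else pvBody pats content ls
end

def extract_deliverables_py_alt (text : String) (patterns : Option (List String)) : String :=
  let patterns := match patterns with
    | none => pvDefaultPatterns
    | some ps => ps
  let pats := patterns.map PySem.Str.lower
  let lines := (PySem.Str.split? text "\n").getD []
  PySem.Str.join "\n" (pvSeek pats lines)

-- ===== PRECONDITION & SPEC =====
def Spec_extract_deliverables_py (text : String) (patterns : Option (List String)) (out : String) : Prop := out = extract_deliverables_py_alt text patterns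
instance (text : String) (patterns : Option (List String)) (out : String) : Decidable (Spec_extract_deliverables_py text patterns out) := by unfold Spec_extract_deliverables_py; infer_instance

-- ===== CLAIM (what is proved, stated in full; the proofs are below) =====
def Claim_equal_extract_deliverables_py : Prop := ∀ (text : String) (patterns : Option (List String)), Dom_extract_deliverables_py text patterns → Spec_extract_deliverables_py text patterns (extract_deliverables_py text patterns)

-- ===== LEMMAS AND PROOFS =====

-- A's inline pattern test on a line equals B's header test (patterns pre-lowered)
theorem pvHeadEq (P : List String) (l : String) :
    (P.any (fun p => PySem.Str.isIn (PySem.Str.lower p) (PySem.Str.lower l)))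
      = pvIsHeader (P.map PySem.Str.lower) l := by
  simp [pvIsHeader, List.any_map, Function.comp_def, pysem]

-- the state-machine invariant: A's fold (with in_section = cur ≠ []) flushed at the end
-- equals acc ++ the eager seek/body output
theorem pvMain (P : List String) (ls : List String) : ∀ (acc cur : List String),
    (let st := ls.foldl (pvAStep P) (acc, !cur.isEmpty, cur); st.1 ++ st.2.2)
      = acc ++ (match cur with
          | [] => pvSeek (P.map PySem.Str.lower) ls
          | h :: cs => (h :: cs) ++ pvBody (P.map PySem.Str.lower) (!cs.isEmpty) ls) := by
  induction ls with
  | nil => intro acc cur; cases cur <;> simp [pvSeek, pvBody]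
  | cons l ls ih =>
    intro acc cur
    simp only [List.foldl_cons]
    by_cases hh : pvIsHeader (P.map PySem.Str.lower) l = true
    · -- header line: flush cur, start [l]
      have hstep : pvAStep P (acc, !cur.isEmpty, cur) l
          = (acc ++ cur, !([l] : List String).isEmpty, [l]) := by
        simp only [pvAStep, pvHeadEq, hh]; simp
      rw [hstep, ih (acc ++ cur) [l]]
      cases cur <;> simp [pvSeek, pvBody, hh]
    · cases cur with
      | nil =>
        have hstep : pvAStep P (acc, !([] : List String).isEmpty, []) l
            = (acc, !([] : List String).isEmpty, []) := by
          simp only [pvAStep, pvHeadEq, hh]; simp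
        rw [hstep, ih acc []]
        simp [pvSeek, hh]
      | cons h cs =>
        by_cases hb : PySem.Str.strip l = ""
        · cases cs with
          | nil =>
            -- blank right after the header: no-op
            have hstep : pvAStep P (acc, !([h] : List String).isEmpty, [h]) l
                = (acc, !([h] : List String).isEmpty, [h]) := by
              simp only [pvAStep, pvHeadEq, hh, hb]; simp
            rw [hstep, ih acc [h]]
            simp [pvBody, hh, hb]
          | cons c cs =>
            -- blank after content: flush and leave the section
            have hstep : pvAStep P (acc, !(h :: c :: cs).isEmpty, h :: c :: cs) l
                = (acc ++ (h :: c :: cs), !([] : List String).isEmpty, []) := by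
              simp only [pvAStep, pvHeadEq, hh, hb]; simp
            rw [hstep, ih (acc ++ (h :: c :: cs)) []]
            simp [pvBody, hh, hb]
        · -- non-blank content line: appended to cur
          have hstep : pvAStep P (acc, !(h :: cs).isEmpty, h :: cs) l
              = (acc, !((h :: cs) ++ [l]).isEmpty, (h :: cs) ++ [l]) := by
            simp only [pvAStep, pvHeadEq, hh]; simp [hb]
          rw [hstep, ih acc ((h :: cs) ++ [l])]
          cases cs <;> simp [pvBody, hh, hb]

-- ===== VERDICT (by name: the statement is the Claim_ definition above) =====
theorem extract_deliverables_py_spec : Claim_equal_extract_deliverables_py := by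
  intro text patterns _
  unfold Spec_extract_deliverables_py extract_deliverables_py extract_deliverables_py_alt
  cases patterns with
  | none =>
    have h := pvMain pvDefaultPatterns ((PySem.Str.split? text "\n").getD []) [] []
    simp only [List.isEmpty_nil, Bool.not_true, List.nil_append] at h
    by_cases hc : (((PySem.Str.split? text "\n").getD []).foldl (pvAStep pvDefaultPatterns) ([], false, [])).2.2 ≠ [] <;>
      simp_all
  | some ps =>
    have h := pvMain ps ((PySem.Str.split? text "\n").getD []) [] []
    simp only [List.isEmpty_nil, Bool.not_true, List.nil_append] at h
    by_cases hc : (((PySem.Str.split? text "\n").getD []).foldl (pvAStep ps) ([], false, [])).2.2 ≠ [] <;>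
      simp_all
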